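-- pv_equiv track=rewrite | github.com/EPFL-LAP/dynamatic | tools/backend/synth-characterization/utils.py | categorize_ports
-- ===== SOURCE A (Python) =====
-- from typing import List, Tuple, Dict
--
-- def categorize_ports(ports: List[str]) -> Dict[str, str]:
--     """
--     Categorize ports based on their types.
--
--     Args:
--         ports (List[str]): List of ports to categorize.
--
--     Returns:
--         Dict[str, str]: Dictionary with port names as keys and their types as values.
--     """
--     categorized_ports = {}
--     for port in ports:
--         if "_valid" in port:
--             categorized_ports[port] = "valid"
--         elif "_ready" in port:
--             categorized_ports[port] = "ready"
--         elif "condition" in port or "index" in port: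
--             categorized_ports[port] = "condition"
--         elif "lhs" in port or "rhs" in port or "trueValue" in port or "falseValue" in port or "ins" in port or "data" in port or "addrIn" in port:
--             categorized_ports[port] = "data"
--         elif "result" in port or "outs" in port or "trueOut" in port or "falseOut" in port or "addrOut" in port or "dataOut" in port:
--             categorized_ports[port] = "data"
--         elif "clk" in port or "clock" in port or "rst" in port or "reset" in port:
--             categorized_ports[port] = "control_signal"
--         else:
--             assert False, f"Unexpected port type for port {port}. Please check the VHDL interface."
--     return categorized_ports
-- ===== SOURCE B (Python) =====
-- # B: pattern-major staged classification — dedupe ports first, then one pass per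
-- # category stage marking still-unclassified ports, reassembled in first-occurrence
-- # order (objective: alternative; A is a port-major single-pass elif cascade).
-- _STAGES = [
--     (("_valid",), "valid"),
--     (("_ready",), "ready"),
--     (("condition", "index"), "condition"),
--     (("lhs", "rhs", "trueValue", "falseValue", "ins", "data", "addrIn",
--       "result", "outs", "trueOut", "falseOut", "addrOut", "dataOut"), "data"),
--     (("clk", "clock", "rst", "reset"), "control_signal"),
-- ]
--
-- def categorize_ports(ports):
--     order = list(dict.fromkeys(ports))
--     cat = {}
--     for subs, label in _STAGES:
--         for port in order:
--             if port not in cat and any(s in port for s in subs):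
--                 cat[port] = label
--     for port in order:
--         assert port in cat, f"Unexpected port type for port {port}. Please check the VHDL interface."
--     return {port: cat[port] for port in order}
-- ===== Notes on version B (the rewrite author's own statement) =====
-- stated objective: alternative
-- what changed: Replaced the port-major elif cascade with pattern-major staged passes: ports are deduplicated first, then each category stage sweeps the remaining unclassified ports in turn, and the result dict is reassembled in first-occurrence order.
import Mathlib
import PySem

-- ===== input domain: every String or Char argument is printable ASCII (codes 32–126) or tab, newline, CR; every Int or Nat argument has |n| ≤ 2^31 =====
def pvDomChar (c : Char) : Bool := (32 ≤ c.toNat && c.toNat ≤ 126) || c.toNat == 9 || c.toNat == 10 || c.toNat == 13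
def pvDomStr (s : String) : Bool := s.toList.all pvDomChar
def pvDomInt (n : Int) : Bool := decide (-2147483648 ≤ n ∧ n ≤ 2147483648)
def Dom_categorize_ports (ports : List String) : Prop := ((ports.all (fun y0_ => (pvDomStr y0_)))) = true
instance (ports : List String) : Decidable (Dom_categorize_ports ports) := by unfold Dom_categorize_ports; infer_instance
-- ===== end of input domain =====

-- B replaces A's port-major elif cascade by pattern-major staged passes over the deduplicated
-- port list, reassembled in first-occurrence order (objective: alternative); same values
-- everywhere A returns.
-- ===== PORT A =====
-- A's elif cascade; the 'assert False' branch (no substring matches) is excluded by Pre_, the port leaves the dict unchanged there.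
def categorize_ports (ports : List String) : List (String × String) :=
  (ports.foldl (fun d port =>
    if PySem.Str.isIn "_valid" port then d.insert port "valid"
    else if PySem.Str.isIn "_ready" port then d.insert port "ready"
    else if PySem.Str.isIn "condition" port || PySem.Str.isIn "index" port then d.insert port "condition"
    else if PySem.Str.isIn "lhs" port || PySem.Str.isIn "rhs" port || PySem.Str.isIn "trueValue" port || PySem.Str.isIn "falseValue" port || PySem.Str.isIn "ins" port || PySem.Str.isIn "data" port || PySem.Str.isIn "addrIn" port then d.insert port "data"
    else if PySem.Str.isIn "result" port || PySem.Str.isIn "outs" port || PySem.Str.isIn "trueOut" port || PySem.Str.isIn "falseOut" port || PySem.Str.isIn "addrOut" port || PySem.Str.isIn "dataOut" port then d.insert port "data"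
    else if PySem.Str.isIn "clk" port || PySem.Str.isIn "clock" port || PySem.Str.isIn "rst" port || PySem.Str.isIn "reset" port then d.insert port "control_signal"
    else d  -- assert False (Pre_ excludes this case)
  ) (PySem.Dict.empty : PySem.Dict String String)).items

-- ===== PORT B =====
def pvStages : List (List String × String) :=
  [ (["_valid"], "valid"),
    (["_ready"], "ready"),
    (["condition", "index"], "condition"),
    (["lhs", "rhs", "trueValue", "falseValue", "ins", "data", "addrIn",
      "result", "outs", "trueOut", "falseOut", "addrOut", "dataOut"], "data"),
    (["clk", "clock", "rst", "reset"], "control_signal") ]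

-- the staged passes: 'for subs, label in _STAGES: for port in order: …'
def pvClassify (order : List String) : PySem.Dict String String :=
  pvStages.foldl (fun cat pr =>
    order.foldl (fun cat port =>
      if !cat.contains port && pr.1.any (fun s => PySem.Str.isIn s port)
      then cat.insert port pr.2 else cat) cat)
    (PySem.Dict.empty : PySem.Dict String String)

def categorize_ports_alt (ports : List String) : List (String × String) :=
  let order := PySem.List.dedup ports      -- list(dict.fromkeys(ports))
  -- the 'assert port in cat' loop raises only outside Pre_; cat[port] is then total, ported as getD
  (order.foldl (fun d port => d.insert port ((pvClassify order).getD port ""))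
    (PySem.Dict.empty : PySem.Dict String String)).items

-- ===== PRECONDITION & SPEC =====
-- Pre_ excludes exactly the inputs on which Python A raises AssertionError: a port name containing none of the known substrings.
def Pre_categorize_ports (ports : List String) : Prop :=
  (ports.all (fun p =>
    PySem.Str.isIn "_valid" p || PySem.Str.isIn "_ready" p || PySem.Str.isIn "condition" p ||
    PySem.Str.isIn "index" p || PySem.Str.isIn "lhs" p || PySem.Str.isIn "rhs" p ||
    PySem.Str.isIn "trueValue" p || PySem.Str.isIn "falseValue" p || PySem.Str.isIn "ins" p ||
    PySem.Str.isIn "data" p || PySem.Str.isIn "addrIn" p || PySem.Str.isIn "result" p ||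
    PySem.Str.isIn "outs" p || PySem.Str.isIn "trueOut" p || PySem.Str.isIn "falseOut" p ||
    PySem.Str.isIn "addrOut" p || PySem.Str.isIn "dataOut" p || PySem.Str.isIn "clk" p ||
    PySem.Str.isIn "clock" p || PySem.Str.isIn "rst" p || PySem.Str.isIn "reset" p)) = true
instance (ports : List String) : Decidable (Pre_categorize_ports ports) := by unfold Pre_categorize_ports; infer_instance
def pvWitness_categorize_ports : List String := ["ins_valid", "outs_ready", "clk", "dataOut0"]
def Spec_categorize_ports (ports : List String) (out : List (String × String)) : Prop := out = categorize_ports_alt ports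
instance (ports : List String) (out : List (String × String)) : Decidable (Spec_categorize_ports ports out) := by unfold Spec_categorize_ports; infer_instance

-- ===== CLAIM (what is proved, stated in full; the proofs are below) =====
def Claim_equal_categorize_ports : Prop := ∀ (ports : List String), Dom_categorize_ports ports → Pre_categorize_ports ports → Spec_categorize_ports ports (categorize_ports ports)

-- ===== LEMMAS AND PROOFS =====

-- A's cascade as a pure classification function (default "" is never reached under Pre_)
def pvCat (port : String) : String :=
  if PySem.Str.isIn "_valid" port then "valid"
  else if PySem.Str.isIn "_ready" port then "ready"
  else if PySem.Str.isIn "condition" port || PySem.Str.isIn "index" port then "condition"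
  else if PySem.Str.isIn "lhs" port || PySem.Str.isIn "rhs" port || PySem.Str.isIn "trueValue" port || PySem.Str.isIn "falseValue" port || PySem.Str.isIn "ins" port || PySem.Str.isIn "data" port || PySem.Str.isIn "addrIn" port then "data"
  else if PySem.Str.isIn "result" port || PySem.Str.isIn "outs" port || PySem.Str.isIn "trueOut" port || PySem.Str.isIn "falseOut" port || PySem.Str.isIn "addrOut" port || PySem.Str.isIn "dataOut" port then "data"
  else if PySem.Str.isIn "clk" port || PySem.Str.isIn "clock" port || PySem.Str.isIn "rst" port || PySem.Str.isIn "reset" port then "control_signal"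
  else ""

-- label of the first stage whose substring list matches
def pvFirstMatch : List (List String × String) → String → Option String
  | [], _ => none
  | pr :: rest, p =>
    if pr.1.any (fun s => PySem.Str.isIn s p) then some pr.2 else pvFirstMatch rest p

-- the match condition of Pre_, as a named abbreviation for the lemmas below
def pvMatches (p : String) : Prop :=
  (PySem.Str.isIn "_valid" p || PySem.Str.isIn "_ready" p || PySem.Str.isIn "condition" p ||
    PySem.Str.isIn "index" p || PySem.Str.isIn "lhs" p || PySem.Str.isIn "rhs" p ||
    PySem.Str.isIn "trueValue" p || PySem.Str.isIn "falseValue" p || PySem.Str.isIn "ins" p ||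
    PySem.Str.isIn "data" p || PySem.Str.isIn "addrIn" p || PySem.Str.isIn "result" p ||
    PySem.Str.isIn "outs" p || PySem.Str.isIn "trueOut" p || PySem.Str.isIn "falseOut" p ||
    PySem.Str.isIn "addrOut" p || PySem.Str.isIn "dataOut" p || PySem.Str.isIn "clk" p ||
    PySem.Str.isIn "clock" p || PySem.Str.isIn "rst" p || PySem.Str.isIn "reset" p) = true

-- a fold inserting key-determined values: items are the first-occurrence keys paired with f
theorem pv_insert_keyfun_items (f : String → String) (ports : List String) :
    ∀ (K : List String) (d : PySem.Dict String String),
      d.items = K.map (fun k => (k, f k)) →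
      (ports.foldl (fun d p => d.insert p (f p)) d).items
        = (PySem.Set.update K ports).map (fun k => (k, f k)) := by
  induction ports with
  | nil => intro K d hd; simpa [PySem.Set.update] using hd
  | cons p rest ih =>
    intro K d hd
    have hkeys : d.keys = K := by
      simp [PySem.Dict.keys, hd, Function.comp_def]
    rw [List.foldl_cons]
    by_cases hp : p ∈ K
    · have hc : d.contains p = true := by
        rw [PySem.Dict.contains_iff_mem_keys, hkeys]; exact hp
      have hitems : (d.insert p (f p)).items = d.items := by
        rw [PySem.Dict.items_insert_of_contains d (f p) hc, hd, List.map_map]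
        apply List.map_congr_left
        intro k _
        by_cases hk : k = p
        · subst hk; simp
        · simp [hk]
      have hadd : PySem.Set.add K p = K := by
        simp [PySem.Set.add, PySem.Set.contains, hp]
      have := ih (PySem.Set.add K p) (d.insert p (f p)) (by rw [hitems, hd, hadd])
      simpa [PySem.Set.update] using this
    · have hc : d.contains p = false := by
        rw [Bool.eq_false_iff]
        intro h
        exact hp (by rwa [PySem.Dict.contains_iff_mem_keys, hkeys] at h)
      have hitems : (d.insert p (f p)).items = (K ++ [p]).map (fun k => (k, f k)) := by
        rw [PySem.Dict.items_insert_of_not_contains d (f p) hc, hd]; simp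
      have hadd : PySem.Set.add K p = K ++ [p] := by
        simp [PySem.Set.add, PySem.Set.contains, hp]
      have := ih (PySem.Set.add K p) (d.insert p (f p)) (by rw [hitems, hadd])
      simpa [PySem.Set.update] using this

-- get? after one stage's sweep over the port list
theorem pv_inner_get? (pr : List String × String) (order : List String) :
    ∀ (cat : PySem.Dict String String) (p : String),
      (order.foldl (fun c q =>
        if !c.contains q && pr.1.any (fun s => PySem.Str.isIn s q)
        then c.insert q pr.2 else c) cat).get? p
      = if cat.contains p = false ∧ p ∈ order ∧ (pr.1.any (fun s => PySem.Str.isIn s p)) = true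
        then some pr.2 else cat.get? p := by
  induction order with
  | nil =>
    intro cat p
    rw [List.foldl_nil, if_neg]
    intro h
    exact absurd h.2.1 (List.not_mem_nil)
  | cons q rest ih =>
    intro cat p
    rw [List.foldl_cons]
    by_cases hq : (!cat.contains q && pr.1.any (fun s => PySem.Str.isIn s q)) = true
    · rw [if_pos hq, ih]
      simp only [Bool.and_eq_true, Bool.not_eq_true'] at hq
      obtain ⟨hcq, hmq⟩ := hq
      by_cases hpq : p = q
      · subst hpq
        have h1 : ¬((cat.insert p pr.2).contains p = false ∧ p ∈ rest ∧
            (pr.1.any (fun s => PySem.Str.isIn s p)) = true) := by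
          intro hcond
          have h2 := PySem.Dict.contains_insert_self cat p pr.2
          rw [hcond.1] at h2
          exact absurd h2 (by simp)
        rw [if_neg h1, if_pos ⟨hcq, by simp, hmq⟩]
        exact PySem.Dict.get?_insert_self cat p pr.2
      · rw [PySem.Dict.get?_insert_of_ne cat pr.2 hpq, PySem.Dict.contains_insert]
        have hbq : (p == q) = false := by simp [hpq]
        rw [hbq, Bool.false_or]
        have hmem : (p ∈ q :: rest) ↔ (p ∈ rest) := by simp [hpq]
        exact if_congr (by rw [hmem]) rfl rfl
    · rw [if_neg hq, ih]
      by_cases hpq : p = q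
      · subst hpq
        by_cases hcp : cat.contains p = false
        · have hm : ¬ (pr.1.any (fun s => PySem.Str.isIn s p)) = true := by
            intro hm; exact hq (by rw [hcp, hm]; rfl)
          rw [if_neg (fun h => hm h.2.2), if_neg (fun h => hm h.2.2)]
        · rw [if_neg (fun h => hcp h.1), if_neg (fun h => hcp h.1)]
      · have hmem : (p ∈ q :: rest) ↔ (p ∈ rest) := by simp [hpq]
        exact if_congr (by rw [hmem]) rfl rfl

-- composing a stage prefix with the remaining stages
def pvComb (g : String → Option String) (pats : List (List String × String)) (p : String) : Option String :=
  match g p with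
  | some c => some c
  | none => pvFirstMatch pats p

theorem pv_outer_get? (order : List String) :
    ∀ (pats : List (List String × String)) (cat : PySem.Dict String String)
      (g : String → Option String),
      (∀ p, cat.get? p = if p ∈ order then g p else none) →
      ∀ p, (pats.foldl (fun c pr =>
              order.foldl (fun c q =>
                if !c.contains q && pr.1.any (fun s => PySem.Str.isIn s q)
                then c.insert q pr.2 else c) c) cat).get? p
            = if p ∈ order then pvComb g pats p else none := by
  intro pats
  induction pats with
  | nil =>
    intro cat g h p
    rw [List.foldl_nil, h p]
    by_cases hp : p ∈ order
    · rw [if_pos hp, if_pos hp]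
      cases hgp : g p <;> simp [pvComb, pvFirstMatch, hgp]
    · rw [if_neg hp, if_neg hp]
  | cons pr rest ih =>
    intro cat g h p
    rw [List.foldl_cons]
    set g' : String → Option String := fun p =>
      match g p with
      | some c => some c
      | none => if pr.1.any (fun s => PySem.Str.isIn s p) then some pr.2 else none with hg'
    have hstep : ∀ p, (order.foldl (fun c q =>
        if !c.contains q && pr.1.any (fun s => PySem.Str.isIn s q)
        then c.insert q pr.2 else c) cat).get? p = if p ∈ order then g' p else none := by
      intro p
      rw [pv_inner_get? pr order cat p]
      have hcont := PySem.Dict.contains_eq_isSome_get? cat p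
      rw [h p] at hcont
      by_cases hp : p ∈ order
      · rw [if_pos hp] at hcont
        cases hgp : g p with
        | some c =>
          have hcf : cat.contains p = true := by rw [hcont, hgp]; rfl
          rw [if_neg (fun hcond => absurd hcond.1 (by rw [hcf]; simp)),
            h p, if_pos hp, hgp, if_pos hp]
          simp only [hg', hgp]
        | none =>
          have hcf : cat.contains p = false := by rw [hcont, hgp]; rfl
          by_cases hm : (pr.1.any (fun s => PySem.Str.isIn s p)) = true
          · rw [if_pos ⟨hcf, hp, hm⟩, if_pos hp]
            simp only [hg', hgp]
            rw [if_pos hm]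
          · rw [if_neg (fun hcond => hm hcond.2.2), h p, if_pos hp, hgp, if_pos hp]
            simp only [hg', hgp]
            rw [if_neg hm]
      · rw [if_neg (fun hcond => hp hcond.2.1), h p, if_neg hp, if_neg hp]
    rw [ih _ g' hstep p]
    by_cases hp : p ∈ order
    · rw [if_pos hp, if_pos hp]
      cases hgp : g p with
      | some c => simp only [pvComb, hg', hgp]
      | none =>
        simp only [pvComb, hg', hgp, pvFirstMatch]
        by_cases hm : (pr.1.any (fun s => PySem.Str.isIn s p)) = true
        · rw [if_pos hm, if_pos hm]
        · rw [if_neg hm, if_neg hm]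
    · rw [if_neg hp, if_neg hp]

-- under Pre_'s match condition, the stage table's first match is exactly A's cascade value
theorem pv_match_firstMatch (p : String) (hp : pvMatches p) :
    pvFirstMatch pvStages p = some (pvCat p) := by
  unfold pvMatches at hp
  simp only [pvStages, pvFirstMatch, pvCat, List.any_cons, List.any_nil, Bool.or_false]
  split_ifs <;> first | rfl | (exfalso; revert hp; simp_all)

-- under Pre_'s match condition, A's loop step inserts pvCat
theorem pv_stepA_eq (d : PySem.Dict String String) (p : String) (hp : pvMatches p) :
    (if PySem.Str.isIn "_valid" p then d.insert p "valid"
    else if PySem.Str.isIn "_ready" p then d.insert p "ready"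
    else if PySem.Str.isIn "condition" p || PySem.Str.isIn "index" p then d.insert p "condition"
    else if PySem.Str.isIn "lhs" p || PySem.Str.isIn "rhs" p || PySem.Str.isIn "trueValue" p || PySem.Str.isIn "falseValue" p || PySem.Str.isIn "ins" p || PySem.Str.isIn "data" p || PySem.Str.isIn "addrIn" p then d.insert p "data"
    else if PySem.Str.isIn "result" p || PySem.Str.isIn "outs" p || PySem.Str.isIn "trueOut" p || PySem.Str.isIn "falseOut" p || PySem.Str.isIn "addrOut" p || PySem.Str.isIn "dataOut" p then d.insert p "data"
    else if PySem.Str.isIn "clk" p || PySem.Str.isIn "clock" p || PySem.Str.isIn "rst" p || PySem.Str.isIn "reset" p then d.insert p "control_signal"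
    else d) = d.insert p (pvCat p) := by
  unfold pvMatches at hp
  unfold pvCat
  split_ifs <;> first | rfl | (exfalso; revert hp; simp_all)

theorem pv_foldl_add_of_nodup (xs : List String) :
    ∀ acc : List String, (acc ++ xs).Nodup → xs.foldl PySem.Set.add acc = acc ++ xs := by
  induction xs with
  | nil => intro acc _; simp
  | cons x t ih =>
    intro acc h
    have hx : x ∉ acc := by
      intro hx
      rw [List.nodup_append] at h
      exact h.2.2 x hx x (show x ∈ x :: t by simp) rfl
    rw [List.foldl_cons]
    have hadd : PySem.Set.add acc x = acc ++ [x] := by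
      simp [PySem.Set.add, PySem.Set.contains, hx]
    rw [hadd, ih (acc ++ [x]) (by simpa [List.append_assoc] using h)]
    simp

theorem pv_ofList_of_nodup (xs : List String) (h : xs.Nodup) : PySem.Set.ofList xs = xs := by
  rw [PySem.Set.ofList_eq_foldl]
  simpa using pv_foldl_add_of_nodup xs [] (by simpa using h)

-- ===== VERDICT (by name: the statement is the Claim_ definition above) =====
theorem categorize_ports_spec : Claim_equal_categorize_ports := by
  intro ports _ hpre
  unfold Spec_categorize_ports
  have hpre' : ∀ p ∈ ports, pvMatches p := by
    intro p hp
    unfold Pre_categorize_ports at hpre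
    rw [List.all_eq_true] at hpre
    exact hpre p hp
  -- A's side: items of the port-major insert loop
  have hA : categorize_ports ports
      = (PySem.Set.ofList ports).map (fun k => (k, pvCat k)) := by
    unfold categorize_ports
    rw [PySem.List.foldl_congr_mem ports _ (fun d p => d.insert p (pvCat p)) _
      (fun acc p hp => pv_stepA_eq acc p (hpre' p hp))]
    have := pv_insert_keyfun_items pvCat ports [] PySem.Dict.empty (by rfl)
    rw [this]
    rfl
  -- B's side: items of the reassembly loop over the deduplicated list
  have horder : PySem.List.dedup ports = PySem.Set.ofList ports :=
    PySem.List.dedup_eq_ofList ports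
  have hB : categorize_ports_alt ports
      = (PySem.List.dedup ports).map
          (fun k => (k, (pvClassify (PySem.List.dedup ports)).getD k "")) := by
    unfold categorize_ports_alt
    have := pv_insert_keyfun_items
      (fun p => (pvClassify (PySem.List.dedup ports)).getD p "")
      (PySem.List.dedup ports) [] PySem.Dict.empty (by rfl)
    rw [this]
    have hnd : (PySem.List.dedup ports).Nodup := PySem.List.nodup_dedup ports
    have : PySem.Set.update ([] : List String) (PySem.List.dedup ports)
        = PySem.List.dedup ports := by
      show PySem.Set.ofList (PySem.List.dedup ports) = PySem.List.dedup ports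
      exact pv_ofList_of_nodup _ hnd
    rw [this]
  rw [hA, hB, horder]
  apply List.map_congr_left
  intro k hk
  have hkports : k ∈ ports := by
    rw [← horder] at hk
    exact (PySem.List.mem_dedup ports k).1 hk
  have hget : (pvClassify (PySem.Set.ofList ports)).get? k = some (pvCat k) := by
    unfold pvClassify
    rw [pv_outer_get? (PySem.Set.ofList ports) pvStages PySem.Dict.empty (fun _ => none)
      (fun p => by rw [PySem.Dict.get?_empty]; by_cases hp : p ∈ PySem.Set.ofList ports <;> simp [hp])
      k]
    rw [if_pos hk]
    show pvFirstMatch pvStages k = some (pvCat k)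
    exact pv_match_firstMatch k (hpre' k hkports)
  rw [PySem.Dict.getD_eq_get?_getD, hget]
  rfl
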